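-- pv_equiv track=rewrite | github.com/AllTheGoodNamesAreGone/bitmap_to_svg_test | src/create_svg_2.py | group_nearby_lines
-- ===== SOURCE A (Python) =====
-- def group_nearby_lines(lines, direction, threshold=80):
--     """
--     Group lines that are close together (likely part of the same table)
--     """
--     if not lines:
--         return []
--
--     groups = []
--     current_group = [lines[0]]
--
--     for line in lines[1:]:
--         if direction == 'horizontal':
--             prev_pos = current_group[-1]['y']
--             curr_pos = line['y']
--         else:
--             prev_pos = current_group[-1]['x']
--             curr_pos = line['x']
--
--         if abs(curr_pos - prev_pos) <= threshold:
--             current_group.append(line)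
--         else:
--             if len(current_group) >= 1:  # Keep groups with at least 1 line
--                 groups.append(current_group)
--             current_group = [line]
--
--     # Don't forget the last group
--     if len(current_group) >= 1:
--         groups.append(current_group)
--
--     return groups
-- ===== SOURCE B (Python) =====
-- def group_nearby_lines(lines, direction, threshold=80):
--     """Group lines that are close together (likely part of the same table)."""
--     if not lines:
--         return []
--     key = 'y' if direction == 'horizontal' else 'x'
--     tail, groups = [], []
--     for prev, cur in reversed(list(zip(lines, lines[1:]))):
--         if abs(cur[key] - prev[key]) <= threshold:
--             tail = [cur] + tail
--         else:
--             groups = [[cur] + tail] + groups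
--             tail = []
--     return [[lines[0]] + tail] + groups
-- ===== Notes on version B (the rewrite author's own statement) =====
-- stated objective: alternative
-- what changed: Replaces A's forward accumulator loop (mutable current_group appended to and flushed into groups) with a single reversed pass over consecutive line pairs that builds the grouped list back-to-front by consing onto the open group, with no flush step or trailing-group special case.
import Mathlib
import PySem

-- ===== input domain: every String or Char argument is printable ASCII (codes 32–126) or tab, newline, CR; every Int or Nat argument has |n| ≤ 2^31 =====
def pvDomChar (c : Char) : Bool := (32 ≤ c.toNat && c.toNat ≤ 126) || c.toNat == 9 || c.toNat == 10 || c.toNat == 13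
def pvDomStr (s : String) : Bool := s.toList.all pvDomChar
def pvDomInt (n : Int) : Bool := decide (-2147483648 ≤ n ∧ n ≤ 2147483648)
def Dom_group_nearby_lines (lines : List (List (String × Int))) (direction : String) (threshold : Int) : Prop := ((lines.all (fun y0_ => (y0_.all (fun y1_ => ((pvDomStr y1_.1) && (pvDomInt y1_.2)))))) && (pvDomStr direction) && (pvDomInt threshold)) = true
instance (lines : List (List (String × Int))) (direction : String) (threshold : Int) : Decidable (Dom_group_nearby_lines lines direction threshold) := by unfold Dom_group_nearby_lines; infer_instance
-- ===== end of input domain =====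

-- B builds the result back-to-front: a reversed pass over consecutive pairs that conses each
-- line onto the front of the open group (no accumulator of finished groups being appended to);
-- objective: alternative decomposition, same behaviour (return value AND KeyError cases).

-- d[k] for an association-list dict; missing key = KeyError in Python, excluded by Pre_ (0 default here).
def pvDGet (d : List (String × Int)) (k : String) : Int :=
  ((PySem.Dict.mk d).get? k).getD 0

-- ===== PORT A =====
def group_nearby_lines (lines : List (List (String × Int))) (direction : String) (threshold : Int) : List (List (List (String × Int))) :=
  match lines with
  | [] => []
  | l0 :: rest =>
    let st := rest.foldl (fun (st : List (List (List (String × Int))) × List (List (String × Int))) line =>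
      let pc := if direction == "horizontal"
                then (pvDGet (PySem.List.pyGetD st.2 (-1) []) "y", pvDGet line "y")
                else (pvDGet (PySem.List.pyGetD st.2 (-1) []) "x", pvDGet line "x")
      if |pc.2 - pc.1| ≤ threshold then (st.1, st.2 ++ [line])
      else ((if 1 ≤ st.2.length then st.1 ++ [st.2] else st.1), [line])) ([], [l0])
    if 1 ≤ st.2.length then st.1 ++ [st.2] else st.1

-- ===== PORT B =====
def group_nearby_lines_alt (lines : List (List (String × Int))) (direction : String) (threshold : Int) : List (List (List (String × Int))) :=
  match lines with
  | [] => []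
  | l0 :: _ =>
    let key := if direction == "horizontal" then "y" else "x"
    let pairs := lines.zip (PySem.List.slice lines (some 1) none)
    let st := pairs.reverse.foldl (fun (st : List (List (String × Int)) × List (List (List (String × Int)))) pc =>
      if |pvDGet pc.2 key - pvDGet pc.1 key| ≤ threshold
      then (pc.2 :: st.1, st.2)
      else ([], (pc.2 :: st.1) :: st.2)) ([], [])
    (l0 :: st.1) :: st.2

-- ===== PRECONDITION & SPEC =====
-- Pre_ excludes exactly the inputs on which Python A raises KeyError: two or more lines and
-- some line lacking the position key ('y' for horizontal, 'x' otherwise).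
def Pre_group_nearby_lines (lines : List (List (String × Int))) (direction : String) (threshold : Int) : Prop :=
  2 ≤ lines.length → ∀ l ∈ lines, ((PySem.Dict.mk l).get? (if direction == "horizontal" then "y" else "x")).isSome = true
instance (lines : List (List (String × Int))) (direction : String) (threshold : Int) : Decidable (Pre_group_nearby_lines lines direction threshold) := by unfold Pre_group_nearby_lines; infer_instance

def pvWitness_group_nearby_lines : (List (List (String × Int))) × String × Int :=
  ([[("y", 0)], [("y", 50)], [("y", 200)]], "horizontal", 80)

def Spec_group_nearby_lines (lines : List (List (String × Int))) (direction : String) (threshold : Int) (out : List (List (List (String × Int)))) : Prop := out = group_nearby_lines_alt lines direction threshold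
instance (lines : List (List (String × Int))) (direction : String) (threshold : Int) (out : List (List (List (String × Int)))) : Decidable (Spec_group_nearby_lines lines direction threshold out) := by unfold Spec_group_nearby_lines; infer_instance

-- ===== CLAIM (what is proved, stated in full; the proofs are below) =====
def Claim_equal_group_nearby_lines : Prop := ∀ (lines : List (List (String × Int))) (direction : String) (threshold : Int), Dom_group_nearby_lines lines direction threshold → Pre_group_nearby_lines lines direction threshold → Spec_group_nearby_lines lines direction threshold (group_nearby_lines lines direction threshold)

-- ===== LEMMAS AND PROOFS =====

-- the common recursive shape both ports reduce to
def pvSplit (key : String) (t : Int) (prev : List (String × Int)) (rest : List (List (String × Int))) :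
    List (List (String × Int)) × List (List (List (String × Int))) :=
  match rest with
  | [] => ([], [])
  | c :: rs =>
    let r := pvSplit key t c rs
    if |pvDGet c key - pvDGet prev key| ≤ t then (c :: r.1, r.2) else ([], (c :: r.1) :: r.2)

theorem pvB_foldr (key : String) (t : Int) :
    ∀ (rest : List (List (String × Int))) (prev : List (String × Int)),
    (((prev :: rest).zip rest).reverse.foldl (fun (st : List (List (String × Int)) × List (List (List (String × Int)))) pc =>
      if |pvDGet pc.2 key - pvDGet pc.1 key| ≤ t
      then (pc.2 :: st.1, st.2)
      else ([], (pc.2 :: st.1) :: st.2)) ([], [])) = pvSplit key t prev rest := by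
  intro rest
  induction rest with
  | nil => intro prev; rfl
  | cons c rs ih =>
    intro prev
    simp only [List.zip_cons_cons, List.foldl_reverse] at ih ⊢
    simp only [List.foldr_cons, ih c, pvSplit]

theorem pvA_foldl (key : String) (t : Int) (direction : String)
    (hkey : key = (if direction == "horizontal" then "y" else "x")) :
    ∀ (rest : List (List (String × Int))) (gs : List (List (List (String × Int))))
      (cg : List (List (String × Int))) (prev : List (String × Int))
      (h : cg ≠ []) (hp : cg.getLast h = prev),
    (let st := rest.foldl (fun (st : List (List (List (String × Int))) × List (List (String × Int))) line =>
      let pc := if direction == "horizontal"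
                then (pvDGet (PySem.List.pyGetD st.2 (-1) []) "y", pvDGet line "y")
                else (pvDGet (PySem.List.pyGetD st.2 (-1) []) "x", pvDGet line "x")
      if |pc.2 - pc.1| ≤ t then (st.1, st.2 ++ [line])
      else ((if 1 ≤ st.2.length then st.1 ++ [st.2] else st.1), [line])) (gs, cg)
     if 1 ≤ st.2.length then st.1 ++ [st.2] else st.1)
    = gs ++ (cg ++ (pvSplit key t prev rest).1) :: (pvSplit key t prev rest).2 := by
  intro rest
  induction rest with
  | nil =>
    intro gs cg prev h hp
    simp only [List.foldl_nil, pvSplit, List.append_nil]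
    rw [if_pos (show 1 ≤ cg.length by cases cg with | nil => exact absurd rfl h | cons a l => simp)]
  | cons x rs ih =>
    intro gs cg prev h hp
    have hlast : PySem.List.pyGetD cg (-1) [] = cg.getLast h := PySem.List.pyGetD_neg_one (xs := cg) [] h
    have hpc : (if direction == "horizontal"
                then (pvDGet (PySem.List.pyGetD cg (-1) []) "y", pvDGet x "y")
                else (pvDGet (PySem.List.pyGetD cg (-1) []) "x", pvDGet x "x"))
             = (pvDGet prev key, pvDGet x key) := by
      rw [hlast, hp, hkey]; cases hd : direction == "horizontal" <;> simp [hd]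
    simp only [List.foldl_cons, hpc]
    by_cases hc : |pvDGet x key - pvDGet prev key| ≤ t
    · rw [if_pos hc]
      rw [ih gs (cg ++ [x]) x (by simp) (by simp)]
      simp [pvSplit, hc]
    · rw [if_neg hc]
      rw [show (if 1 ≤ cg.length then gs ++ [cg] else gs) = gs ++ [cg] from
        if_pos (by cases cg with | nil => exact absurd rfl h | cons a l => simp)]
      rw [ih (gs ++ [cg]) [x] x (by simp) (by simp)]
      simp [pvSplit, hc]

-- ===== VERDICT (by name: the statement is the Claim_ definition above) =====
theorem group_nearby_lines_spec : Claim_equal_group_nearby_lines := by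
  intro lines direction threshold _ _
  unfold Spec_group_nearby_lines group_nearby_lines group_nearby_lines_alt
  cases lines with
  | nil => rfl
  | cons l0 rest =>
    simp only [PySem.List.slice_from_one, List.tail_cons]
    rw [pvB_foldr (if direction == "horizontal" then "y" else "x") threshold rest l0]
    rw [pvA_foldl (if direction == "horizontal" then "y" else "x") threshold direction rfl
      rest [] [l0] l0 (by simp) (by simp)]
    simp
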